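-- pv_equiv track=rewrite | github.com/MrBrantCode/unitest_baseline | mut_generate/mist_train_cf/cf_90726/solution.py | sum_of_divisors_excluding_primes
-- ===== SOURCE A (Python) =====
-- def sum_of_divisors_excluding_primes(num):
--     def is_prime(n):
--         if n < 2:
--             return False
--         for i in range(2, int(n**0.5) + 1):
--             if n % i == 0:
--                 return False
--         return True
--
--     divisors_sum = 0
--     for i in range(1, num + 1):
--         if num % i == 0:
--             if not is_prime(i):
--                 divisors_sum += i
--     return divisors_sum
-- ===== SOURCE B (Python) =====
-- def sum_of_divisors_excluding_primes(num):
--     def is_prime(n):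
--         if n < 2:
--             return False
--         d = 2
--         while d * d <= n:
--             if n % d == 0:
--                 return False
--             d += 1
--         return True
--
--     total = 0
--     i = 1
--     while i * i <= num:
--         if num % i == 0:
--             j = num // i
--             if not is_prime(i):
--                 total += i
--             if j != i and not is_prime(j):
--                 total += j
--         i += 1
--     return total
-- ===== Notes on version B (the rewrite author's own statement) =====
-- stated objective: faster
-- what changed: B enumerates divisors in pairs (i, num//i) only up to sqrt(num) instead of scanning every i from 1 to num, primality-testing only actual divisors.
import Mathlib
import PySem

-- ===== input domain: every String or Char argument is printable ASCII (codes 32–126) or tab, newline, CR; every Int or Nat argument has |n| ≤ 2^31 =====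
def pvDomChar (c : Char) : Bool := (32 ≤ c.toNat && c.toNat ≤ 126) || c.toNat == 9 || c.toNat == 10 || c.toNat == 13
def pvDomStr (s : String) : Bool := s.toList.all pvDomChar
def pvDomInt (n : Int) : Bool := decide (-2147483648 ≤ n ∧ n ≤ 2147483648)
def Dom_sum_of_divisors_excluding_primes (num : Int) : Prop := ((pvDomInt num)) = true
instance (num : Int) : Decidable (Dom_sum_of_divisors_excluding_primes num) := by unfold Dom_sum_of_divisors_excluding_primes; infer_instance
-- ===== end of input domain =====

-- B replaces A's scan of every i in 1..num by a paired divisor enumeration up to sqrt(num); asymptotically faster, same return value.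

-- ===== PORT A =====
-- int(n**0.5) = Nat.sqrt n.toNat : exact for 0 ≤ n ≤ 2^31 (double sqrt truncation equals the integer square root there);
-- the for-loop with early 'return False' is the negation of 'any divisor found'.
def pvIsPrimeA (n : Int) : Bool :=
  if n < 2 then false
  else !((PySem.List.pyRange 2 ((Nat.sqrt n.toNat : Int) + 1) 1).any (fun i => PySem.Int.mod n i == 0))

def sum_of_divisors_excluding_primes (num : Int) : Int :=
  (PySem.List.pyRange 1 (num + 1) 1).foldl
    (fun acc i =>
      if PySem.Int.mod num i == 0 then
        if !pvIsPrimeA i then acc + i else acc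
      else acc) 0

-- ===== PORT B =====
-- while d*d <= n trial division; n ≥ 2 on entry so Nat arithmetic matches Python's exactly
def pvIsPrimeBLoop (m d : Nat) : Bool :=
  if _h : d * d ≤ m then
    if m % d == 0 then false else pvIsPrimeBLoop m (d + 1)
  else true
termination_by m + 1 - d
decreasing_by
  rcases Nat.eq_zero_or_pos d with h0 | h0
  · omega
  · have : d ≤ d * d := Nat.le_mul_of_pos_left d h0
    omega

def pvIsPrimeB (n : Int) : Bool :=
  if n < 2 then false else pvIsPrimeBLoop n.toNat 2

-- while i*i <= num main loop of Source B
def pvSumLoopB (num : Int) (i : Nat) (total : Int) : Int :=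
  if _h : (i : Int) * i ≤ num then
    pvSumLoopB num (i + 1)
      (if PySem.Int.mod num i == 0 then
        let j := PySem.Int.floordiv num i
        let t := if !pvIsPrimeB i then total + i else total
        if j != (i : Int) && !pvIsPrimeB j then t + j else t
      else total)
  else total
termination_by num.toNat + 1 - i
decreasing_by
  rcases Nat.eq_zero_or_pos i with h0 | h0
  · subst h0; simp at _h; omega
  · have h1 : (1 : Int) ≤ (i : Int) := by exact_mod_cast h0
    have : (i : Int) ≤ (i : Int) * i := le_mul_of_one_le_right (by omega) h1
    omega

def sum_of_divisors_excluding_primes_alt (num : Int) : Int := pvSumLoopB num 1 0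

-- ===== PRECONDITION & SPEC =====
def Spec_sum_of_divisors_excluding_primes (num : Int) (out : Int) : Prop := out = sum_of_divisors_excluding_primes_alt num
instance (num : Int) (out : Int) : Decidable (Spec_sum_of_divisors_excluding_primes num out) := by unfold Spec_sum_of_divisors_excluding_primes; infer_instance

-- ===== CLAIM (what is proved, stated in full; the proofs are below) =====
def Claim_equal_sum_of_divisors_excluding_primes : Prop := ∀ (num : Int), Dom_sum_of_divisors_excluding_primes num → Spec_sum_of_divisors_excluding_primes num (sum_of_divisors_excluding_primes num)

-- ===== LEMMAS AND PROOFS =====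

-- value contributed by a non-prime divisor d
def pvHval (d : Nat) : Int := if Nat.Prime d then 0 else (d : Int)

-- contribution of one iteration of B's main loop at k (for num = m ≥ 1)
def pvCval (m k : Nat) : Int :=
  if k ∣ m then pvHval k + (if m / k ≠ k then pvHval (m / k) else 0) else 0

theorem pvIsPrimeA_eq (d : Nat) : pvIsPrimeA (d : Int) = decide (Nat.Prime d) := by
  unfold pvIsPrimeA
  by_cases hd : d < 2
  · rw [if_pos (by exact_mod_cast hd)]
    have hnp : ¬ Nat.Prime d := by interval_cases d <;> decide
    simp [hnp]
  · rw [if_neg (by exact_mod_cast hd)]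
    rw [Nat.not_lt] at hd
    simp only [Int.toNat_natCast]
    rw [Bool.eq_iff_iff]
    simp only [Bool.not_eq_eq_eq_not, Bool.not_true, List.any_eq_false, decide_eq_true_eq,
      PySem.List.mem_pyRange_one, beq_iff_eq, PySem.Int.mod_eq_zero_iff_dvd]
    constructor
    · intro h
      rw [Nat.prime_def_le_sqrt]
      refine ⟨hd, fun k hk hks hkd => ?_⟩
      exact h (k : Int) ⟨by exact_mod_cast hk, by omega⟩ (by exact_mod_cast hkd)
    · intro hp x ⟨hx2, hxlt⟩ hxd
      have hx : (x.toNat : Int) = x := by omega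
      apply (Nat.prime_def_le_sqrt.mp hp).2 x.toNat (by omega) (by omega)
      rw [← Int.natCast_dvd_natCast]
      rw [hx]; exact hxd

theorem pvIsPrimeBLoop_iff (m d : Nat) :
    pvIsPrimeBLoop m d = true ↔ ∀ k, d ≤ k → k * k ≤ m → ¬ k ∣ m := by
  fun_induction pvIsPrimeBLoop m d with
  | case1 d h hdvd =>
    simp only [Bool.false_eq_true, false_iff]
    intro hall
    exact hall d le_rfl h (Nat.dvd_of_mod_eq_zero (by simpa using hdvd))
  | case2 d h hdvd ih =>
    rw [ih]
    constructor
    · intro hall k hk hkk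
      rcases Nat.eq_or_lt_of_le hk with rfl | hlt
      · exact fun hdd => hdvd (by simp [Nat.mod_eq_zero_of_dvd hdd])
      · exact hall k hlt hkk
    · intro hall k hk hkk
      exact hall k (Nat.le_of_succ_le hk) hkk
  | case3 d h =>
    simp only [true_iff]
    intro k hk hkk hdd
    exact h (le_trans (Nat.mul_le_mul hk hk) hkk)

theorem pvIsPrimeB_eq (d : Nat) : pvIsPrimeB (d : Int) = decide (Nat.Prime d) := by
  unfold pvIsPrimeB
  by_cases hd : d < 2
  · rw [if_pos (by exact_mod_cast hd)]
    have hnp : ¬ Nat.Prime d := by interval_cases d <;> decide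
    simp [hnp]
  · rw [if_neg (by exact_mod_cast hd)]
    simp only [Int.toNat_natCast]
    rw [Bool.eq_iff_iff, pvIsPrimeBLoop_iff, decide_eq_true_iff]
    rw [Nat.prime_def_le_sqrt]
    constructor
    · intro h
      exact ⟨by omega, fun k hk hks => h k hk (Nat.le_sqrt.mp hks)⟩
    · intro ⟨_, h⟩ k hk hkk
      exact h k hk (Nat.le_sqrt.mpr hkk)

theorem pvA_sum (m : Nat) :
    sum_of_divisors_excluding_primes (m : Int) = ∑ d ∈ m.divisors, pvHval d := by
  unfold sum_of_divisors_excluding_primes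
  have hbody : (fun (acc : Int) (i : Int) =>
      if PySem.Int.mod (m : Int) i == 0 then if !pvIsPrimeA i then acc + i else acc else acc)
      = (fun (acc : Int) (i : Int) =>
      acc + (if (PySem.Int.mod (m : Int) i == 0 && !pvIsPrimeA i) then i else 0)) := by
    funext acc i
    by_cases h1 : PySem.Int.mod (m : Int) i == 0 <;> by_cases h2 : pvIsPrimeA i <;>
      simp [h1, h2]
  rw [hbody, PySem.List.foldl_add, PySem.List.pyRange_one, List.map_map]
  have hlen : ((m : Int) + 1 - 1).toNat = m := by omega
  rw [hlen]
  have hsum : ((List.range m).map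
      ((fun i : Int => if (PySem.Int.mod (m : Int) i == 0 && !pvIsPrimeA i) then i else 0) ∘
        (fun k : Nat => (1 : Int) + k))).sum
      = ∑ k ∈ Finset.range m, (fun d : Nat =>
          if (PySem.Int.mod (m : Int) (d : Int) == 0 && !pvIsPrimeA (d : Int)) then (d : Int) else 0) (1 + k) := by
    have : ∀ k : Nat, ((1 : Int) + (k : Int)) = (((1 + k : Nat) : Int)) := by intro k; push_cast; ring
    rw [show ((fun i : Int => if (PySem.Int.mod (m : Int) i == 0 && !pvIsPrimeA i) then i else 0) ∘
        (fun k : Nat => (1 : Int) + k))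
      = (fun k : Nat => (fun d : Nat =>
          if (PySem.Int.mod (m : Int) (d : Int) == 0 && !pvIsPrimeA (d : Int)) then (d : Int) else 0) (1 + k)) from
      funext fun k => by simp only [Function.comp]; rw [this k]]
    rfl
  rw [hsum, zero_add]
  have hIco : (∑ k ∈ Finset.range m, (fun d : Nat =>
          if (PySem.Int.mod (m : Int) (d : Int) == 0 && !pvIsPrimeA (d : Int)) then (d : Int) else 0) (1 + k))
      = ∑ d ∈ Finset.Ico 1 (m + 1), (fun d : Nat =>
          if (PySem.Int.mod (m : Int) (d : Int) == 0 && !pvIsPrimeA (d : Int)) then (d : Int) else 0) d := by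
    rw [Finset.sum_Ico_eq_sum_range]
    simp only [Nat.add_sub_cancel]
  rw [hIco]
  have hcond : ∀ d ∈ Finset.Ico 1 (m + 1),
      (if (PySem.Int.mod (m : Int) (d : Int) == 0 && !pvIsPrimeA (d : Int)) then (d : Int) else 0)
      = (if d ∣ m then pvHval d else 0) := by
    intro d _
    have hmodeq : (PySem.Int.mod (m : Int) (d : Int) == 0) = decide (d ∣ m) := by
      by_cases h1 : d ∣ m
      · have h2 : ((d : Int)) ∣ (m : Int) := Int.natCast_dvd_natCast.mpr h1
        simp [h1, h2]
      · have h2 : ¬ ((d : Int)) ∣ (m : Int) := fun hc => h1 (Int.natCast_dvd_natCast.mp hc)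
        simp [h1, h2]
    rw [hmodeq, pvIsPrimeA_eq]
    by_cases h1 : d ∣ m <;> by_cases h2 : Nat.Prime d <;> simp [h1, h2, pvHval]
  rw [Finset.sum_congr rfl hcond, ← Finset.sum_filter]
  congr 1

theorem pvModEq (m i : Nat) : (PySem.Int.mod (m : Int) (i : Int) == 0) = decide (i ∣ m) := by
  by_cases h1 : i ∣ m
  · have h2 : ((i : Int)) ∣ (m : Int) := Int.natCast_dvd_natCast.mpr h1
    simp [h1, h2]
  · have h2 : ¬ ((i : Int)) ∣ (m : Int) := fun hc => h1 (Int.natCast_dvd_natCast.mp hc)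
    simp [h1, h2]

theorem pvStep (m i : Nat) (h1 : i ∣ m) (total : Int) :
    (if PySem.Int.mod (m : Int) (i : Nat) == 0 then
        let j := PySem.Int.floordiv (m : Int) (i : Nat)
        let t := if !pvIsPrimeB (i : Nat) then total + (i : Nat) else total
        if j != ((i : Nat) : Int) && !pvIsPrimeB j then t + j else t
      else total) = total + pvCval m i := by
  rw [pvModEq]
  simp only [h1, decide_true, if_true, PySem.Int.floordiv_natCast, pvIsPrimeB_eq]
  by_cases h3 : m / i = i <;> by_cases h2 : Nat.Prime i <;> by_cases h4 : Nat.Prime (m / i) <;>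
    simp [pvCval, pvHval, h1, h2, h3, h4] <;> omega

theorem pvLoopAux (m : Nat) (n : Nat) :
    ∀ (i : Nat) (total : Int), 1 ≤ i → Nat.sqrt m + 1 - i ≤ n →
      pvSumLoopB (m : Int) i total = total + ∑ k ∈ Finset.Ico i (Nat.sqrt m + 1), pvCval m k := by
  induction n with
  | zero =>
    intro i total hi hn
    have hgt : Nat.sqrt m < i := by omega
    have hcond : ¬ ((i : Int) * (i : Nat) ≤ (m : Int)) := by
      intro hc
      have := Nat.le_sqrt.mpr (by exact_mod_cast hc)
      omega
    rw [pvSumLoopB, dif_neg hcond, Finset.Ico_eq_empty (by omega), Finset.sum_empty, add_zero]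
  | succ n ih =>
    intro i total hi hn
    by_cases hle : i ≤ Nat.sqrt m
    · have hcond : ((i : Int) * (i : Nat) ≤ (m : Int)) := by exact_mod_cast Nat.le_sqrt.mp hle
      rw [pvSumLoopB, dif_pos hcond]
      by_cases h1 : i ∣ m
      · rw [pvStep m i h1 total]
        rw [ih (i + 1) (total + pvCval m i) (by omega) (by omega)]
        rw [Finset.sum_eq_sum_Ico_succ_bot (by omega : i < Nat.sqrt m + 1)]
        ring
      · have hmod : (PySem.Int.mod (m : Int) (i : Nat) == 0) = false := by
          rw [pvModEq]; simp [h1]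
        rw [if_neg (by rw [hmod]; exact Bool.false_ne_true)]
        rw [ih (i + 1) total (by omega) (by omega)]
        rw [Finset.sum_eq_sum_Ico_succ_bot (by omega : i < Nat.sqrt m + 1)]
        have : pvCval m i = 0 := by simp [pvCval, h1]
        rw [this]
        ring
    · have hcond : ¬ ((i : Int) * (i : Nat) ≤ (m : Int)) := by
        intro hc
        have := Nat.le_sqrt.mpr (by exact_mod_cast hc)
        omega
      rw [pvSumLoopB, dif_neg hcond, Finset.Ico_eq_empty (by omega), Finset.sum_empty, add_zero]

theorem pvSumLoopB_sum (m : Nat) (i : Nat) (hi : 1 ≤ i) (total : Int) :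
    pvSumLoopB (m : Int) i total = total + ∑ k ∈ Finset.Ico i (Nat.sqrt m + 1), pvCval m k :=
  pvLoopAux m (Nat.sqrt m + 1 - i) i total hi le_rfl

theorem pvCrux (m : Nat) (hm : 1 ≤ m) :
    ∑ d ∈ m.divisors, pvHval d = ∑ k ∈ Finset.Ico 1 (Nat.sqrt m + 1), pvCval m k := by
  have hm0 : m ≠ 0 := by omega
  have hs1 : Nat.sqrt m * Nat.sqrt m ≤ m := Nat.sqrt_le m
  have hs2 : m < (Nat.sqrt m + 1) * (Nat.sqrt m + 1) := Nat.lt_succ_sqrt m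
  have hspos : 0 < Nat.sqrt m := Nat.sqrt_pos.mpr (by omega)
  have hR : ∑ k ∈ (Finset.Ico 1 (Nat.sqrt m + 1)).filter (· ∣ m),
        (pvHval k + (if m / k ≠ k then pvHval (m / k) else 0))
      = ∑ k ∈ Finset.Ico 1 (Nat.sqrt m + 1), pvCval m k := by
    rw [Finset.sum_filter]
    exact Finset.sum_congr rfl (fun k _ => rfl)
  rw [← hR]
  have hSmall : (Finset.Ico 1 (Nat.sqrt m + 1)).filter (· ∣ m)
      = m.divisors.filter (· ≤ Nat.sqrt m) := by
    ext k
    simp only [Finset.mem_filter, Finset.mem_Ico, Nat.mem_divisors]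
    constructor
    · rintro ⟨⟨hk1, hk2⟩, hkd⟩
      exact ⟨⟨hkd, hm0⟩, by omega⟩
    · rintro ⟨⟨hkd, _⟩, hks⟩
      have := Nat.pos_of_dvd_of_pos hkd (by omega)
      exact ⟨⟨by omega, by omega⟩, hkd⟩
  rw [hSmall, Finset.sum_add_distrib,
    ← Finset.sum_filter_add_sum_filter_not m.divisors (· ≤ Nat.sqrt m) pvHval]
  congr 1
  rw [← Finset.sum_filter]
  refine Finset.sum_nbij' (fun d => m / d) (fun k => m / k) ?_ ?_ ?_ ?_ ?_
  · intro d hd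
    simp only [Finset.mem_filter, Nat.mem_divisors] at hd ⊢
    obtain ⟨⟨hdd, _⟩, hds⟩ := hd
    have hdpos : 0 < d := Nat.pos_of_dvd_of_pos hdd (by omega)
    have hsd : Nat.sqrt m + 1 ≤ d := by omega
    have h7 : m / d ≤ m / (Nat.sqrt m + 1) := Nat.div_le_div_left hsd (by omega)
    have h8 : m / (Nat.sqrt m + 1) < Nat.sqrt m + 1 := (Nat.div_lt_iff_lt_mul (by omega)).mpr hs2
    have h10 : m / (m / d) = d := Nat.div_div_self hdd hm0
    exact ⟨⟨⟨Nat.div_dvd_of_dvd hdd, hm0⟩, by omega⟩, by rw [h10]; omega⟩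
  · intro k hk
    simp only [Finset.mem_filter, Nat.mem_divisors] at hk ⊢
    obtain ⟨⟨⟨hkd, _⟩, hks⟩, hne⟩ := hk
    have hkpos : 0 < k := Nat.pos_of_dvd_of_pos hkd (by omega)
    have hmul : m / k * k = m := Nat.div_mul_cancel hkd
    refine ⟨⟨Nat.div_dvd_of_dvd hkd, hm0⟩, ?_⟩
    intro hle2
    have h5 : m ≤ Nat.sqrt m * Nat.sqrt m := by
      calc m = m / k * k := hmul.symm
        _ ≤ Nat.sqrt m * Nat.sqrt m := Nat.mul_le_mul hle2 hks
    rcases Nat.lt_or_ge (m / k) (Nat.sqrt m) with hlt | hge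
    · have : m / k * k < Nat.sqrt m * Nat.sqrt m :=
        calc m / k * k ≤ m / k * Nat.sqrt m := Nat.mul_le_mul_left _ hks
          _ < Nat.sqrt m * Nat.sqrt m := (Nat.mul_lt_mul_right hspos).mpr hlt
      omega
    · have hdk : m / k = Nat.sqrt m := by omega
      have hmm : m = Nat.sqrt m * Nat.sqrt m := le_antisymm h5 hs1
      have hsk : Nat.sqrt m * k = Nat.sqrt m * Nat.sqrt m := by
        calc Nat.sqrt m * k = m / k * k := by rw [hdk]
          _ = m := hmul
          _ = Nat.sqrt m * Nat.sqrt m := hmm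
      have : k = Nat.sqrt m := Nat.eq_of_mul_eq_mul_left hspos hsk
      exact hne (by omega)
  · intro d hd
    simp only [Finset.mem_filter, Nat.mem_divisors] at hd
    exact Nat.div_div_self hd.1.1 hm0
  · intro k hk
    simp only [Finset.mem_filter, Nat.mem_divisors] at hk
    exact Nat.div_div_self hk.1.1.1 hm0
  · intro d hd
    simp only [Finset.mem_filter, Nat.mem_divisors] at hd
    rw [Nat.div_div_self hd.1.1 hm0]

theorem sum_of_divisors_excluding_primes_spec : Claim_equal_sum_of_divisors_excluding_primes := by
  intro num _
  unfold Spec_sum_of_divisors_excluding_primes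
  unfold sum_of_divisors_excluding_primes_alt
  by_cases hle : num ≤ 0
  · unfold sum_of_divisors_excluding_primes
    rw [PySem.List.pyRange_one_eq_nil (by omega)]
    rw [pvSumLoopB, dif_neg (by omega)]
    rfl
  · have hm : 1 ≤ num.toNat := by omega
    have hnum : ((num.toNat : Nat) : Int) = num := by omega
    rw [← hnum, pvA_sum, pvSumLoopB_sum num.toNat 1 le_rfl 0, zero_add]
    exact pvCrux num.toNat hm
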